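-- pv_equiv track=rewrite | github.com/nine314211915-cpu/idcardmaker | app.py | find_records_by_serial_lookup
-- ===== SOURCE A (Python) =====
-- def find_records_by_serial_lookup(records, lookup):
--     lookup_text = str(lookup or "").strip()
--     if not lookup_text:
--         return []
--     exact_matches = [record for record in (records or []) if str(record.get("serial_no", "")).strip() == lookup_text]
--     if exact_matches:
--         return exact_matches
--     return [
--         record
--         for record in (records or [])
--         if str(record.get("serial_no", "")).strip().endswith(lookup_text)
--     ]
-- ===== SOURCE B (Python) =====
-- def find_records_by_serial_lookup(records, lookup):
--     lookup_text = str(lookup or "").strip()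
--     if not lookup_text:
--         return []
--     exact, suffix = [], []
--     for record in (records or []):
--         s = str(record.get("serial_no", "")).strip()
--         if s == lookup_text:
--             exact.append(record)
--         elif s.endswith(lookup_text):
--             suffix.append(record)
--     return exact if exact else suffix
-- ===== Notes on version B (the rewrite author's own statement) =====
-- stated objective: alternative
-- what changed: Replaced A's two separate filtering passes over the records with a single loop that classifies each record once (computing the stripped serial once per record) into an exact list and a suffix list, returning the suffix list only when no exact match exists.
import Mathlib
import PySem

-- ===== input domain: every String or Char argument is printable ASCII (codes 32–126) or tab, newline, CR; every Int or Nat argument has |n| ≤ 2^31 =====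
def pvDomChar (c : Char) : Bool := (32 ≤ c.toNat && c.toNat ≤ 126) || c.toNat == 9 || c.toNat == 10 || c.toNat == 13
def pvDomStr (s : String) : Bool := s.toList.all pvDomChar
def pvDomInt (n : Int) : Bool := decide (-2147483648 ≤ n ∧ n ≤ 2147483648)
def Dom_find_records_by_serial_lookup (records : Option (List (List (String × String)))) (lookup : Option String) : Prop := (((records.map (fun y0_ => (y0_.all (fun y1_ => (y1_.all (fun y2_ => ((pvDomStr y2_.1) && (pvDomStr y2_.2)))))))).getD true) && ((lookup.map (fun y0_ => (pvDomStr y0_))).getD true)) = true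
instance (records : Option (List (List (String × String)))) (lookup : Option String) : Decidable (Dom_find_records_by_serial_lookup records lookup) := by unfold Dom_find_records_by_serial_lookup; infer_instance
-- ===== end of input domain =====

-- B replaces A's two separate filtering passes with one loop classifying each record
-- (stripping its serial once) into exact/suffix lists; same results, single pass (objective: alternative).

-- ===== PORT A =====
def find_records_by_serial_lookup (records : Option (List (List (String × String)))) (lookup : Option String) : List (List (String × String)) :=
  let lookup_text := PySem.Str.strip (lookup.getD "")
  if lookup_text == "" then []
  else
    let recs := records.getD []
    let exact_matches := recs.filter
      (fun r => PySem.Str.strip ((r.lookup "serial_no").getD "") == lookup_text)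
    if !exact_matches.isEmpty then exact_matches
    else recs.filter
      (fun r => PySem.Str.endswith (PySem.Str.strip ((r.lookup "serial_no").getD "")) lookup_text)

-- ===== PORT B =====
def find_records_by_serial_lookup_alt (records : Option (List (List (String × String)))) (lookup : Option String) : List (List (String × String)) :=
  let lookup_text := PySem.Str.strip (lookup.getD "")
  if lookup_text == "" then []
  else
    let res := (records.getD []).foldl
      (fun (acc : List (List (String × String)) × List (List (String × String))) r =>
        let s := PySem.Str.strip ((r.lookup "serial_no").getD "")
        if s == lookup_text then (acc.1 ++ [r], acc.2)
        else if PySem.Str.endswith s lookup_text then (acc.1, acc.2 ++ [r])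
        else acc)
      ([], [])
    if res.1.isEmpty then res.2 else res.1

-- ===== PRECONDITION & SPEC =====
def Spec_find_records_by_serial_lookup (records : Option (List (List (String × String)))) (lookup : Option String) (out : List (List (String × String))) : Prop := out = find_records_by_serial_lookup_alt records lookup
instance (records : Option (List (List (String × String)))) (lookup : Option String) (out : List (List (String × String))) : Decidable (Spec_find_records_by_serial_lookup records lookup out) := by unfold Spec_find_records_by_serial_lookup; infer_instance

-- ===== CLAIM (what is proved, stated in full; the proofs are below) =====
def Claim_equal_find_records_by_serial_lookup : Prop := ∀ (records : Option (List (List (String × String)))) (lookup : Option String), Dom_find_records_by_serial_lookup records lookup → Spec_find_records_by_serial_lookup records lookup (find_records_by_serial_lookup records lookup)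

-- ===== LEMMAS AND PROOFS =====

/-- The single-pass fold accumulates exactly (exact filter, non-exact-but-suffix filter). -/
theorem foldl_classify {α : Type} (p q : α → Bool) (l : List α) (ex suf : List α) :
    l.foldl (fun (acc : List α × List α) r =>
        if p r then (acc.1 ++ [r], acc.2)
        else if q r then (acc.1, acc.2 ++ [r])
        else acc) (ex, suf)
      = (ex ++ l.filter p, suf ++ l.filter (fun r => !p r && q r)) := by
  induction l generalizing ex suf with
  | nil => simp
  | cons a t ih =>
    by_cases hp : p a <;> by_cases hq : q a <;>
      simp [List.foldl_cons, hp, hq, ih]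

-- ===== VERDICT (by name: the statement is the Claim_ definition above) =====
theorem find_records_by_serial_lookup_spec : Claim_equal_find_records_by_serial_lookup := by
  intro records lookup _
  unfold Spec_find_records_by_serial_lookup find_records_by_serial_lookup find_records_by_serial_lookup_alt
  set lt := PySem.Str.strip (lookup.getD "") with hlt
  by_cases h0 : lt == ""
  · simp [h0]
  · simp only [h0, Bool.false_eq_true, if_false]
    set recs := records.getD [] with hrecs
    set p : List (String × String) → Bool :=
      fun r => PySem.Str.strip ((r.lookup "serial_no").getD "") == lt with hp
    set q : List (String × String) → Bool :=
      fun r => PySem.Str.endswith (PySem.Str.strip ((r.lookup "serial_no").getD "")) lt with hq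
    rw [foldl_classify p q recs [] []]
    simp only [List.nil_append]
    by_cases he : (recs.filter p).isEmpty
    · simp only [he, Bool.not_true, if_true, Bool.false_eq_true, if_false]
      have hnil : recs.filter p = [] := List.isEmpty_iff.mp he
      have hall : ∀ r ∈ recs, p r = false := by
        intro r hr
        by_contra hcon
        have : r ∈ recs.filter p := List.mem_filter.mpr ⟨hr, by simpa using hcon⟩
        simp [hnil] at this
      refine List.filter_congr ?_
      intro r hr
      simp [hall r hr]
    · simp [he]
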